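-- pv_equiv track=rewrite | github.com/raehideous/AoC2018 | 5.py | part_one
-- ===== SOURCE A (Python) =====
-- def are_equal(a, b):
--     res=(a.lower() == b.lower() and
--             ((a.isupper() and b.islower()) or
--              (a.islower() and b.isupper())))
--     return res
--
-- def part_one(input):
--     buffer = []
--     for c in input:
--         if buffer and are_equal(c, buffer[-1]):
--             buffer.pop()
--         else:
--             buffer.append(c)
--
--     return len(buffer)
-- ===== SOURCE B (Python) =====
-- def are_equal(a, b):
--     res=(a.lower() == b.lower() and
--             ((a.isupper() and b.islower()) or
--              (a.islower() and b.isupper())))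
--     return res
--
-- def part_one(input):
--     s = list(input)
--     while True:
--         t = []
--         i = 0
--         while i < len(s):
--             if i + 1 < len(s) and are_equal(s[i], s[i + 1]):
--                 i += 2
--             else:
--                 t.append(s[i])
--                 i += 1
--         if len(t) == len(s):
--             return len(t)
--         s = t
-- ===== Notes on version B (the rewrite author's own statement) =====
-- stated objective: alternative
-- what changed: Replaces the single left-to-right stack pass with naive repeated reduction: scan the list removing every non-overlapping adjacent reacting pair, and repeat whole passes until a pass removes nothing; the lengths agree because the reaction system is confluent.
import Mathlib
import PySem

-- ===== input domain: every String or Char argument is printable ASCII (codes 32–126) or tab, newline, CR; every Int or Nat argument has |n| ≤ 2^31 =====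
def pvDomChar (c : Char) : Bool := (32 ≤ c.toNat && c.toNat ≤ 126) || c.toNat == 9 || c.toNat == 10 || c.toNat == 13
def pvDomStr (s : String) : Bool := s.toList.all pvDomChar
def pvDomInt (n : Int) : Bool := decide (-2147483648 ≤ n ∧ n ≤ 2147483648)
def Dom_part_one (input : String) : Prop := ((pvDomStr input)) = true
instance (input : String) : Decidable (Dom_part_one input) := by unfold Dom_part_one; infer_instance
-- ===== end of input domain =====

-- B replaces A's single stack pass by naive repeated whole-list reduction passes until a
-- pass removes no adjacent reacting pair; same length because the reaction is confluent (alternative decomposition, not faster).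


-- ===== PORT A =====
-- are_equal on single characters (the loop feeds it Python 1-char strings), via PySem's exact char ops
def are_equal (a b : Char) : Bool :=
  (PySem.Chars.lowerChar a == PySem.Chars.lowerChar b) &&
    ((PySem.Chars.isupper a && PySem.Chars.islower b) ||
     (PySem.Chars.islower a && PySem.Chars.isupper b))

-- A's loop body: `if buffer and are_equal(c, buffer[-1]): buffer.pop() else: buffer.append(c)`
def stepA (buffer : List Char) (c : Char) : List Char :=
  match PySem.List.pyGet? buffer (-1) with
  | some last => if are_equal c last then buffer.dropLast else buffer ++ [c]
  | none => buffer ++ [c]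

def part_one (input : String) : Int :=
  ((input.toList.foldl stepA []).length : Int)

-- ===== PORT B =====
-- one left-to-right pass removing non-overlapping adjacent reacting pairs (B's inner while)
def onePass : List Char → List Char
  | a :: b :: r => if are_equal a b then onePass r else a :: onePass (b :: r)
  | l => l

theorem onePass_length_le (l : List Char) : (onePass l).length ≤ l.length := by
  induction l using onePass.induct with
  | case1 a b r h ih =>
      simp only [onePass]
      rw [if_pos h]
      simp only [List.length_cons]
      omega
  | case2 a b r h ih =>
      simp only [onePass]
      rw [if_neg h]
      simpa using ih
  | case3 l h1 =>
      rcases l with _ | ⟨x, _ | ⟨y, r⟩⟩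
      · simp [onePass]
      · simp [onePass]
      · exact absurd rfl (h1 x y r)

-- B's outer while: repeat passes until a pass removes nothing (then return the length)
def loopB (s : List Char) : List Char :=
  if (onePass s).length = s.length then onePass s else loopB (onePass s)
termination_by s.length
decreasing_by
  have := onePass_length_le s
  omega

def part_one_alt (input : String) : Int :=
  ((loopB input.toList).length : Int)

-- ===== PRECONDITION & SPEC =====
def Spec_part_one (input : String) (out : Int) : Prop := out = part_one_alt input
instance (input : String) (out : Int) : Decidable (Spec_part_one input out) := by unfold Spec_part_one; infer_instance

-- ===== CLAIM (what is proved, stated in full; the proofs are below) =====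
def Claim_equal_part_one : Prop := ∀ (input : String), Dom_part_one input → Spec_part_one input (part_one input)

-- ===== LEMMAS AND PROOFS =====

theorem are_equal_symm (a b : Char) : are_equal a b = are_equal b a := by
  simp [are_equal, Bool.and_comm, Bool.or_comm, BEq.comm]

theorem char_le_toNat (a b : Char) : a ≤ b ↔ a.toNat ≤ b.toNat :=
  ⟨fun h => Fin.mk_le_mk.mp h, fun h => Fin.mk_le_mk.mpr h⟩

theorem lower_islower {c : Char} (h : PySem.Chars.islower c = true) :
    PySem.Chars.lowerChar c = c := by
  simp only [PySem.Chars.islower, Bool.and_eq_true, decide_eq_true_eq, char_le_toNat] at h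
  have ha : ('a' : Char).toNat = 97 := rfl
  have hz : ('Z' : Char).toNat = 90 := rfl
  have hu : PySem.Chars.isupper c = false := by
    simp only [PySem.Chars.isupper, Bool.and_eq_false_iff, decide_eq_false_iff_not, char_le_toNat]
    right; omega
  simp [PySem.Chars.lowerChar, hu]

theorem toNat_lower_isupper {c : Char} (h : PySem.Chars.isupper c = true) :
    (PySem.Chars.lowerChar c).toNat = c.toNat + 32 := by
  have hb := h
  simp only [PySem.Chars.isupper, Bool.and_eq_true, decide_eq_true_eq, char_le_toNat] at hb
  have hz : ('Z' : Char).toNat = 90 := rfl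
  unfold PySem.Chars.lowerChar
  rw [if_pos h, Char.toNat_ofNat, if_pos (Or.inl (by omega))]

theorem eq_of_are_equal (a b h : Char) (hab : are_equal a b = true)
    (hah : are_equal a h = true) : b = h := by
  simp only [are_equal, Bool.and_eq_true, beq_iff_eq] at hab hah
  obtain ⟨hl1, hc1⟩ := hab
  obtain ⟨hl2, hc2⟩ := hah
  have hdis : ∀ c : Char, PySem.Chars.isupper c = true → PySem.Chars.islower c = true → False := by
    intro c h1 h2
    simp only [PySem.Chars.isupper, PySem.Chars.islower, Bool.and_eq_true, decide_eq_true_eq,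
      char_le_toNat] at h1 h2
    have : ('a' : Char).toNat = 97 := rfl
    have : ('Z' : Char).toNat = 90 := rfl
    omega
  simp only [Bool.or_eq_true, Bool.and_eq_true] at hc1 hc2
  have hlh : PySem.Chars.lowerChar b = PySem.Chars.lowerChar h := hl1 ▸ hl2
  rcases hc1 with ⟨hua, hlb⟩ | ⟨hla, hub⟩
  · rcases hc2 with ⟨_, hlh'⟩ | ⟨hla, _⟩
    · rw [lower_islower hlb, lower_islower hlh'] at hlh; exact hlh
    · exact absurd hla (fun hx => hdis a hua hx)
  · rcases hc2 with ⟨hua, _⟩ | ⟨_, huh⟩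
    · exact absurd hua (fun hx => hdis a hx hla)
    · have e1 := toNat_lower_isupper hub
      have e2 := toNat_lower_isupper huh
      have hn : b.toNat = h.toNat := by rw [hlh] at e1; omega
      exact Char.ext (UInt32.toNat_inj.mp hn)

-- the reduction stack with most recent element at the head
def stepR (s : List Char) (c : Char) : List Char :=
  match s with
  | h :: t => if are_equal c h then t else c :: s
  | [] => [c]

def run (s l : List Char) : List Char := l.foldl stepR s

def StackOK (s : List Char) : Prop := s.IsChain (fun x y => are_equal x y = false)

theorem stepA_eq (b : List Char) (c : Char) : stepA b c = (stepR b.reverse c).reverse := by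
  rcases List.eq_nil_or_concat b with rfl | ⟨t, x, rfl⟩
  · rfl
  · rw [List.concat_eq_append]
    have hg : PySem.List.pyGet? (t ++ [x]) (-1) = some x := by
      simp [PySem.List.pyGet?, PySem.List.pyIdx?]
    simp only [stepA, hg, List.reverse_append, List.reverse_cons, List.reverse_nil,
      List.nil_append, List.singleton_append, stepR]
    split_ifs with hc
    · simp
    · simp

theorem foldl_stepA (l : List Char) : ∀ b, l.foldl stepA b = (run b.reverse l).reverse := by
  induction l with
  | nil => intro b; simp [run]
  | cons c r ih =>
      intro b
      show r.foldl stepA (stepA b c) = (run b.reverse (c :: r)).reverse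
      rw [ih (stepA b c), stepA_eq]
      rw [List.reverse_reverse]
      rfl

theorem stepR_ok (s : List Char) (c : Char) (hs : StackOK s) : StackOK (stepR s c) := by
  match s with
  | [] => exact List.isChain_singleton _
  | h :: t =>
      simp only [stepR]
      split_ifs with hc
      · exact hs.tail
      · exact List.isChain_cons_cons.mpr ⟨Bool.eq_false_iff.mpr hc, hs⟩

theorem run_ok (s l : List Char) (hs : StackOK s) : StackOK (run s l) := by
  induction l generalizing s with
  | nil => exact hs
  | cons c r ih => exact ih _ (stepR_ok s c hs)

theorem step2_cancel (s : List Char) (a b : Char) (hab : are_equal a b = true)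
    (hs : StackOK s) : stepR (stepR s a) b = s := by
  have hba : are_equal b a = true := (are_equal_symm b a).trans hab
  match s with
  | [] => simp [stepR, hba]
  | h :: t =>
      by_cases hah : are_equal a h = true
      · have hbh : b = h := eq_of_are_equal a b h hab hah
        simp only [stepR, hah, if_true]
        subst hbh
        match t with
        | [] => rfl
        | k :: t' =>
            have hhk : are_equal b k = false := (List.isChain_cons_cons.mp hs).1
            simp [hhk]
      · simp only [stepR, hah]
        simp [hba]

theorem run_onePass (l : List Char) : ∀ s, StackOK s → run s (onePass l) = run s l := by
  induction l using onePass.induct with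
  | case1 a b r h ih =>
      intro s hs
      simp only [onePass]
      rw [if_pos h, ih s hs]
      show run s r = run (stepR (stepR s a) b) r
      rw [step2_cancel s a b h hs]
  | case2 a b r h ih =>
      intro s hs
      simp only [onePass]
      rw [if_neg h]
      show run (stepR s a) (onePass (b :: r)) = run (stepR s a) (b :: r)
      exact ih _ (stepR_ok s a hs)
  | case3 l h1 =>
      intro s _
      rcases l with _ | ⟨x, _ | ⟨y, r⟩⟩
      · rfl
      · rfl
      · exact absurd rfl (h1 x y r)

theorem onePass_eq_of_length (l : List Char) (h : (onePass l).length = l.length) :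
    onePass l = l := by
  induction l using onePass.induct with
  | case1 a b r hr ih =>
      exfalso
      have hle := onePass_length_le r
      simp only [onePass] at h
      rw [if_pos hr] at h
      simp only [List.length_cons] at h
      omega
  | case2 a b r hr ih =>
      simp only [onePass] at h ⊢
      rw [if_neg hr] at h ⊢
      simp only [List.length_cons] at h
      rw [ih (by simp only [List.length_cons] at h ⊢; omega)]
  | case3 l h1 =>
      rcases l with _ | ⟨x, _ | ⟨y, r⟩⟩
      · rfl
      · rfl
      · exact absurd rfl (h1 x y r)

theorem noPair_of_fixed (l : List Char) (h : onePass l = l) :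
    l.IsChain (fun x y => are_equal x y = false) := by
  induction l using onePass.induct with
  | case1 a b r hr ih =>
      exfalso
      have hle := onePass_length_le r
      simp only [onePass] at h
      rw [if_pos hr] at h
      have := congrArg List.length h
      simp only [List.length_cons] at this
      omega
  | case2 a b r hr ih =>
      simp only [onePass] at h
      rw [if_neg hr] at h
      simp only [List.cons.injEq, true_and] at h
      exact List.isChain_cons_cons.mpr ⟨Bool.eq_false_iff.mpr hr, ih h⟩
  | case3 l h1 =>
      rcases l with _ | ⟨x, _ | ⟨y, r⟩⟩
      · exact List.isChain_nil
      · exact List.isChain_singleton _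
      · exact absurd rfl (h1 x y r)

theorem loopB_run (s : List Char) :
    run [] (loopB s) = run [] s ∧ onePass (loopB s) = loopB s := by
  rw [loopB]
  by_cases hlen : (onePass s).length = s.length
  · rw [if_pos hlen]
    have hfix := onePass_eq_of_length s hlen
    rw [hfix]
    exact ⟨rfl, by rw [hfix]⟩
  · rw [if_neg hlen]
    have ih := loopB_run (onePass s)
    refine ⟨?_, ih.2⟩
    rw [ih.1]
    exact run_onePass s [] List.isChain_nil
termination_by s.length
decreasing_by
  have := onePass_length_le s
  omega

theorem run_append (l : List Char) : ∀ s, StackOK (l.reverse ++ s) → run s l = l.reverse ++ s := by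
  induction l with
  | nil => intro s _; rfl
  | cons c r ih =>
      intro s hs
      have hs' : StackOK (r.reverse ++ c :: s) := by simpa using hs
      have hstep : stepR s c = c :: s := by
        match s with
        | [] => rfl
        | h :: t =>
            have hch : List.IsChain (fun x y => are_equal x y = false) (c :: h :: t) :=
              List.IsChain.right_of_append hs'
            have : are_equal c h = false := (List.isChain_cons_cons.mp hch).1
            simp [stepR, this]
      show run (stepR s c) r = (c :: r).reverse ++ s
      rw [hstep, ih (c :: s) hs']
      simp

theorem run_nil_of_noPair (l : List Char)
    (h : l.IsChain (fun x y => are_equal x y = false)) : run [] l = l.reverse := by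
  have hok : StackOK (l.reverse ++ []) := by
    simp only [List.append_nil, StackOK, List.isChain_reverse]
    exact h.imp (fun {a b} hab => by
      show are_equal b a = false
      rw [are_equal_symm b a]; exact hab)
  simpa using run_append l [] hok

-- ===== VERDICT (by name: the statement is the Claim_ definition above) =====
theorem part_one_spec : Claim_equal_part_one := by
  intro input _
  unfold Spec_part_one part_one part_one_alt
  rw [foldl_stepA]
  have h1 := loopB_run input.toList
  have h2 := run_nil_of_noPair (loopB input.toList) (noPair_of_fixed _ h1.2)
  have h3 : run [] input.toList = (loopB input.toList).reverse := by
    rw [← h1.1, h2]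
  simp only [List.reverse_nil, h3, List.length_reverse]
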